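-- pv_equiv track=rewrite | github.com/davweb/adventofcode2017 | advent/year2017/day3.py | part2
-- ===== SOURCE A (Python) =====
-- def part2(input):
--     """
--     >>> part2(140)
--     142
--     >>> part2(800)
--     806
--     >>> part2(INPUT)
--     349975
--     """
--
--     x = 0
--     y = 0
--     i = 1
--     value = 1
--     max_x = 0
--     max_y = 0
--     min_x = 0
--     min_y = 0
--
--     direction = 'right'
--     values = {}
--     values[(0,0)] = 1
--
--     def adjacent(x, y):
--         try:
--             return values[(x,y)]
--         except KeyError:
--             return 0
--
--
--     while value < input:
--         i += 1
--
--         if direction == 'right':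
--             x += 1
--             if x > max_x:
--                 max_x = x
--                 direction = 'up'
--         elif direction == 'up':
--             y += 1
--             if y > max_y:
--                 max_y = y
--                 direction = 'left'
--         elif direction == 'left':
--             x -= 1
--             if x < min_x:
--                 min_x = x
--                 direction = 'down'
--         elif direction == 'down':
--             y -= 1
--             if y < min_y:
--                 min_y = y
--                 direction = 'right'
--
--         value = adjacent(x - 1, y - 1) + adjacent(x, y - 1) + adjacent(x + 1, y - 1) + adjacent(x - 1, y) + adjacent(x + 1, y) + adjacent(x - 1, y + 1) + adjacent(x, y + 1) + adjacent(x + 1, y + 1)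
--
--         values[(x,y)] = value
--
--     return value
-- ===== SOURCE B (Python) =====
-- def part2(input):
--     # Same neighbor-sum spiral, but the walk direction is computed statelessly
--     # from the current coordinates (which spiral "octant" (x, y) lies in),
--     # eliminating A's direction string and the four running bounds.
--     values = {(0, 0): 1}
--     x = 0
--     y = 0
--     value = 1
--
--     while value < input:
--         if x > y and x > -y:
--             y += 1
--         elif y >= x and y > -x:
--             x -= 1
--         elif x < 0 and y > x and y <= -x:
--             y -= 1
--         else:
--             x += 1
--
--         value = (values.get((x - 1, y - 1), 0) + values.get((x, y - 1), 0)
--                  + values.get((x + 1, y - 1), 0) + values.get((x - 1, y), 0)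
--                  + values.get((x + 1, y), 0) + values.get((x - 1, y + 1), 0)
--                  + values.get((x, y + 1), 0) + values.get((x + 1, y + 1), 0))
--         values[(x, y)] = value
--
--     return value
-- ===== Notes on version B (the rewrite author's own statement) =====
-- stated objective: simpler
-- what changed: The walk's direction is computed statelessly from the current coordinates (which spiral octant (x,y) lies in) instead of A's direction string plus four running min/max bounds, removing five pieces of loop state.
import Mathlib
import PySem

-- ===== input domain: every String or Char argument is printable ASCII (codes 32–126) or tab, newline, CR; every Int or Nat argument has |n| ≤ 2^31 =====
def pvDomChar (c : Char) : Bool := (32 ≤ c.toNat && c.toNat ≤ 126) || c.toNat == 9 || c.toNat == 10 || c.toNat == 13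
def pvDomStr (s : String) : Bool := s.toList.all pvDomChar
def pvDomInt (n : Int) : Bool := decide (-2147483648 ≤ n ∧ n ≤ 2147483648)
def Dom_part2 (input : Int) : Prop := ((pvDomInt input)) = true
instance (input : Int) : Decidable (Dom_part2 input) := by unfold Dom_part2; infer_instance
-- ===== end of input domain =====

-- B computes the walk direction statelessly from the current coordinates instead of
-- A's direction string plus four running min/max bounds (objective: simpler loop state).

-- ===== PORT A =====

/-- Python A's loop state: position, counter, last value, the four bounds,
the direction string and the dict of spiral values. -/
structure Part2State where
  x : Int
  y : Int
  i : Int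
  value : Int
  maxx : Int
  maxy : Int
  minx : Int
  miny : Int
  dir : String
  values : PySem.Dict (Int × Int) Int
  deriving Repr

/-- `adjacent`: `values[(x,y)]` with KeyError → 0, i.e. dict.getD 0. -/
def part2Adj (values : PySem.Dict (Int × Int) Int) (x y : Int) : Int :=
  values.getD (x, y) 0

/-- The direction/bounds update block of A's loop body (the four `elif` branches). -/
def part2Move (s : Part2State) : Part2State :=
  if s.dir = "right" then
    let x := s.x + 1
    if x > s.maxx then { s with x := x, maxx := x, dir := "up" } else { s with x := x }
  else if s.dir = "up" then
    let y := s.y + 1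
    if y > s.maxy then { s with y := y, maxy := y, dir := "left" } else { s with y := y }
  else if s.dir = "left" then
    let x := s.x - 1
    if x < s.minx then { s with x := x, minx := x, dir := "down" } else { s with x := x }
  else if s.dir = "down" then
    let y := s.y - 1
    if y < s.miny then { s with y := y, miny := y, dir := "right" } else { s with y := y }
  else s

/-- A's `while value < input` loop.  Fuel only makes the recursion structural; the
Python loop exits after far fewer than `input + 2` iterations (the stored value is
at least the iteration count minus one), so the fuel given in `part2` never runs out
on the stated domain. -/
def part2Loop (fuel : Nat) (input : Int) (s : Part2State) : Int :=
  match fuel with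
  | 0 => s.value
  | fuel + 1 =>
    if s.value < input then
      let s1 := part2Move { s with i := s.i + 1 }
      let v := part2Adj s1.values (s1.x - 1) (s1.y - 1) + part2Adj s1.values s1.x (s1.y - 1)
        + part2Adj s1.values (s1.x + 1) (s1.y - 1) + part2Adj s1.values (s1.x - 1) s1.y
        + part2Adj s1.values (s1.x + 1) s1.y + part2Adj s1.values (s1.x - 1) (s1.y + 1)
        + part2Adj s1.values s1.x (s1.y + 1) + part2Adj s1.values (s1.x + 1) (s1.y + 1)
      part2Loop fuel input { s1 with value := v, values := s1.values.insert (s1.x, s1.y) v }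
    else s.value

def part2 (input : Int) : Int :=
  part2Loop (input.toNat + 2) input
    { x := 0, y := 0, i := 1, value := 1, maxx := 0, maxy := 0, minx := 0, miny := 0,
      dir := "right", values := PySem.Dict.ofList [((0, 0), 1)] }

-- ===== PORT B =====

/-- B's stateless step: which spiral octant (x, y) lies in determines the move. -/
def part2AltNext (x y : Int) : Int × Int :=
  if x > y ∧ x > -y then (x, y + 1)
  else if y ≥ x ∧ y > -x then (x - 1, y)
  else if x < 0 ∧ y > x ∧ y ≤ -x then (x, y - 1)
  else (x + 1, y)

/-- B's `while value < input` loop: only position, value and the dict are state.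
Same fuel remark as for `part2Loop`. -/
def part2AltLoop (fuel : Nat) (input x y value : Int)
    (values : PySem.Dict (Int × Int) Int) : Int :=
  match fuel with
  | 0 => value
  | fuel + 1 =>
    if value < input then
      let p := part2AltNext x y
      let v := values.getD (p.1 - 1, p.2 - 1) 0 + values.getD (p.1, p.2 - 1) 0
        + values.getD (p.1 + 1, p.2 - 1) 0 + values.getD (p.1 - 1, p.2) 0
        + values.getD (p.1 + 1, p.2) 0 + values.getD (p.1 - 1, p.2 + 1) 0
        + values.getD (p.1, p.2 + 1) 0 + values.getD (p.1 + 1, p.2 + 1) 0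
      part2AltLoop fuel input p.1 p.2 v (values.insert (p.1, p.2) v)
    else value

def part2_alt (input : Int) : Int :=
  part2AltLoop (input.toNat + 2) input 0 0 1 (PySem.Dict.ofList [((0, 0), 1)])

-- ===== PRECONDITION & SPEC =====
def Spec_part2 (input : Int) (out : Int) : Prop := out = part2_alt input
instance (input : Int) (out : Int) : Decidable (Spec_part2 input out) := by unfold Spec_part2; infer_instance

-- ===== CLAIM (what is proved, stated in full; the proofs are below) =====
def Claim_equal_part2 : Prop := ∀ (input : Int), Dom_part2 input → Spec_part2 input (part2 input)

-- ===== LEMMAS AND PROOFS =====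

/-- Invariant tying A's direction string and bounds to the position. -/
def SpiralInv (s : Part2State) : Prop :=
  (s.dir = "right" ∧ s.maxy = s.maxx ∧ s.minx = -s.maxx ∧ s.miny = -s.maxx ∧
    s.y = -s.maxx ∧ -s.maxx ≤ s.x ∧ s.x ≤ s.maxx ∧ 0 ≤ s.maxx) ∨
  (s.dir = "up" ∧ s.x = s.maxx ∧ s.maxy = s.maxx - 1 ∧ s.minx = 1 - s.maxx ∧
    s.miny = 1 - s.maxx ∧ 1 - s.maxx ≤ s.y ∧ s.y ≤ s.maxx - 1 ∧ 1 ≤ s.maxx) ∨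
  (s.dir = "left" ∧ s.y = s.maxy ∧ s.maxx = s.maxy ∧ s.minx = 1 - s.maxy ∧
    s.miny = 1 - s.maxy ∧ 1 - s.maxy ≤ s.x ∧ s.x ≤ s.maxy ∧ 1 ≤ s.maxy) ∨
  (s.dir = "down" ∧ s.x = s.minx ∧ s.minx = -s.maxy ∧ s.maxx = s.maxy ∧
    s.miny = 1 - s.maxy ∧ 1 - s.maxy ≤ s.y ∧ s.y ≤ s.maxy ∧ 1 ≤ s.maxy)

set_option maxHeartbeats 1600000 in
lemma part2Move_eq_altNext (s : Part2State) (h : SpiralInv s) :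
    ((part2Move s).x, (part2Move s).y) = part2AltNext s.x s.y ∧
    SpiralInv (part2Move s) := by
  rcases h with ⟨hd, h⟩ | ⟨hd, h⟩ | ⟨hd, h⟩ | ⟨hd, h⟩ <;>
    simp only [part2Move, part2AltNext, hd, reduceIte] <;> split_ifs <;>
    simp_all [SpiralInv] <;> omega

lemma part2Move_values (s : Part2State) : (part2Move s).values = s.values := by
  simp only [part2Move]
  split_ifs <;> rfl

lemma part2Loop_eq_alt (fuel : Nat) (input : Int) (s : Part2State) (h : SpiralInv s) :
    part2Loop fuel input s = part2AltLoop fuel input s.x s.y s.value s.values := by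
  induction fuel generalizing s with
  | zero => rfl
  | succ fuel ih =>
    by_cases hlt : s.value < input
    · have h' : SpiralInv ({ s with i := s.i + 1 } : Part2State) := h
      obtain ⟨hxy, hinv⟩ := part2Move_eq_altNext _ h'
      have hx : (part2Move { s with i := s.i + 1 }).x = (part2AltNext s.x s.y).1 :=
        congrArg Prod.fst hxy
      have hy : (part2Move { s with i := s.i + 1 }).y = (part2AltNext s.x s.y).2 :=
        congrArg Prod.snd hxy
      have hv : (part2Move { s with i := s.i + 1 }).values = s.values :=
        part2Move_values _
      simp only [part2Loop, part2AltLoop, if_pos hlt]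
      refine Eq.trans (ih _ ?_) ?_
      · exact hinv
      · simp only [part2Adj]
        rw [hx, hy, hv]
    · simp only [part2Loop, part2AltLoop, if_neg hlt]

-- ===== VERDICT (by name: the statement is the Claim_ definition above) =====
theorem part2_spec : Claim_equal_part2 := by
  intro input _
  unfold Spec_part2 part2 part2_alt
  exact part2Loop_eq_alt _ input _ (Or.inl (by simp))
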